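-- pv_equiv track=rewrite | github.com/nonoswagman/LELEC2811-Group1 | Projet/data_class.py | delData
-- ===== SOURCE A (Python) =====
-- start = "Press 'R' to read the data"
--
-- def delData(data):
--     """ Supprime les données avant la ligne "Press 'R' to read the data"
--     """
--     toret = []
--     for tension in data:
--         if tension == start:
--             toret = []
--         else:
--             toret.append(tension)
--     return toret
-- ===== SOURCE B (Python) =====
-- start = "Press 'R' to read the data"
--
-- def delData(data):
--     """ Supprime les données avant la ligne "Press 'R' to read the data"
--     """
--     tail = []
--     for tension in reversed(data):
--         if tension == start:
--             break
--         tail.append(tension)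
--     tail.reverse()
--     return tail
-- ===== Notes on version B (the rewrite author's own statement) =====
-- stated objective: alternative
-- what changed: Scans from the end and stops at the first (i.e. last) start marker, collecting only the final tail, instead of scanning forward and resetting an accumulator at every marker.
import Mathlib
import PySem

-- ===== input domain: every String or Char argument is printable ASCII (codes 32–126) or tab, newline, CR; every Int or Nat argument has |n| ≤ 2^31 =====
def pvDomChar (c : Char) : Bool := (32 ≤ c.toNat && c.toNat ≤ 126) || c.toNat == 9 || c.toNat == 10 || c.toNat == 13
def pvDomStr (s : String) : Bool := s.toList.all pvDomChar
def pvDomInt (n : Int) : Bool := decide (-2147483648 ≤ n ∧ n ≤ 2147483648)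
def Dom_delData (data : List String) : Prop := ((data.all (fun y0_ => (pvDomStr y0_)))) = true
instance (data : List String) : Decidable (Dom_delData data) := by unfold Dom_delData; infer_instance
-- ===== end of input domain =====

-- B scans from the end and keeps only the tail after the last marker; A scans forward resetting its accumulator.

def pvStart : String := "Press 'R' to read the data"

-- ===== PORT A =====
-- forward loop: reset accumulator on marker, else append
def delData (data : List String) : List String :=
  data.foldl (fun toret tension => if tension = pvStart then [] else toret ++ [tension]) []

-- ===== PORT B =====
-- loop over reversed(data), break at marker (collect stops), then reverse the buffer
def delDataCollect : List String → List String
  | [] => []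
  | tension :: rest => if tension = pvStart then [] else tension :: delDataCollect rest

def delData_alt (data : List String) : List String :=
  (delDataCollect data.reverse).reverse

-- ===== PRECONDITION & SPEC =====
def Spec_delData (data : List String) (out : List String) : Prop := out = delData_alt data
instance (data : List String) (out : List String) : Decidable (Spec_delData data out) := by unfold Spec_delData; infer_instance

-- ===== CLAIM (what is proved, stated in full; the proofs are below) =====
def Claim_equal_delData : Prop := ∀ (data : List String), Dom_delData data → Spec_delData data (delData data)

-- ===== LEMMAS AND PROOFS =====

theorem delData_eq_alt (data : List String) : delData data = delData_alt data := by
  induction data using List.reverseRecOn with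
  | nil => rfl
  | append_singleton xs x ih =>
      simp only [delData, delData_alt, List.foldl_append, List.foldl_cons, List.foldl_nil,
        List.reverse_append, List.reverse_singleton, List.singleton_append,
        delDataCollect] at *
      by_cases hx : x = pvStart
      · simp [hx]
      · simp [hx, ih]

-- ===== VERDICT (by name: the statement is the Claim_ definition above) =====
theorem delData_spec : Claim_equal_delData := by
  intro data _
  exact delData_eq_alt data
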